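-- pv_equiv track=rewrite | github.com/isaac-w-dev/PokemonScripts | automatic_script_teleporting/files_pre_conversion/reusable_gpc_functions.py | string_to_variable
-- ===== SOURCE A (Python) =====
-- def string_to_variable(target_string):
--     variable_name = ''
--     for char in target_string.lower():
--         if char in ' -':
--             variable_name += '_'
--         elif char in '().': continue
--         else:
--             variable_name += char
--     return variable_name
-- ===== SOURCE B (Python) =====
-- def string_to_variable(target_string):
--     s = target_string.lower()
--     return s.replace(' ', '_').replace('-', '_').replace('(', '').replace(')', '').replace('.', '')
-- ===== Notes on version B (the rewrite author's own statement) =====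
-- stated objective: faster
-- what changed: Replaces the character-by-character classifying loop that builds the result by repeated string concatenation with one lowercasing followed by a chain of whole-string str.replace passes, one per substituted or removed character; correct because the five replaced characters are pairwise distinct and none of them equals the introduced underscore.
import Mathlib
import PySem

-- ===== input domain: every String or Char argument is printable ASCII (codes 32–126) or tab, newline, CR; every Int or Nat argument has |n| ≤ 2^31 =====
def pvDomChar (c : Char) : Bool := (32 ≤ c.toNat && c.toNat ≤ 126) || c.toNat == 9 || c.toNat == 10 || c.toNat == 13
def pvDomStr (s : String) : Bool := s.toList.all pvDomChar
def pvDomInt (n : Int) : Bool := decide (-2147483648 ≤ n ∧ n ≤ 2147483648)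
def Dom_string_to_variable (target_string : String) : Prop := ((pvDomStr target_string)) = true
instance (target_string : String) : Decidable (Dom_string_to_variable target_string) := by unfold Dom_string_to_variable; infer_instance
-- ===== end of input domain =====

-- B replaces A's single character-classifying loop (string built by +=) with a chain of
-- whole-string replace passes after one lowercasing; objective: idiomatic.

-- ===== PORT A =====
-- per-character loop: '+= "_"' for ' ' and '-', skip for '(' ')' '.', else keep the char
def string_to_variable (target_string : String) : String :=
  String.ofList <|
    (PySem.Str.lower target_string).toList.foldl
      (fun variable_name char =>
        if char = ' ' || char = '-' then variable_name ++ ['_']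
        else if char = '(' || char = ')' || char = '.' then variable_name
        else variable_name ++ [char]) []

-- ===== PORT B =====
def string_to_variable_alt (target_string : String) : String :=
  let s := PySem.Str.lower target_string
  PySem.Str.replace (PySem.Str.replace (PySem.Str.replace (PySem.Str.replace
    (PySem.Str.replace s " " "_") "-" "_") "(" "") ")" "") "." ""

-- ===== PRECONDITION & SPEC =====
def Spec_string_to_variable (target_string : String) (out : String) : Prop := out = string_to_variable_alt target_string
instance (target_string : String) (out : String) : Decidable (Spec_string_to_variable target_string out) := by unfold Spec_string_to_variable; infer_instance

-- ===== CLAIM (what is proved, stated in full; the proofs are below) =====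
def Claim_equal_string_to_variable : Prop := ∀ (target_string : String), Dom_string_to_variable target_string → Spec_string_to_variable target_string (string_to_variable target_string)

-- ===== LEMMAS AND PROOFS =====

-- single-character replace is a flatMap (specific shape Port B's passes take)
theorem replace_go_single (a : Char) (new : List Char) :
    ∀ (cs : List Char) (fuel : Nat) (acc : List Char), cs.length ≤ fuel →
      PySem.Chars.replace.go [a] new fuel cs acc
        = acc.reverse ++ cs.flatMap (fun c => if c = a then new else [c]) := by
  intro cs
  induction cs with
  | nil =>
    intro fuel acc _
    cases fuel <;> simp [PySem.Chars.replace.go]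
  | cons c t ih =>
    intro fuel acc hle
    cases fuel with
    | zero => simp at hle
    | succ n =>
      simp only [PySem.Chars.replace.go]
      by_cases hc : c = a
      · subst hc
        have hp : List.isPrefixOf [c] (c :: t) = true := by simp [List.isPrefixOf]
        rw [if_pos hp]
        rw [show List.drop [c].length (c :: t) = t from rfl]
        rw [ih n (new.reverse ++ acc) (by simpa using Nat.le_of_succ_le_succ hle)]
        simp
      · have hp : List.isPrefixOf [a] (c :: t) = false := by
          simp [List.isPrefixOf]; exact fun h => (hc h.symm).elim
        rw [hp]
        simp only [Bool.false_eq_true, if_false]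
        rw [ih n (c :: acc) (by simpa using Nat.le_of_succ_le_succ hle)]
        simp [hc]

theorem replace_single (cs : List Char) (a : Char) (new : List Char) :
    PySem.Chars.replace cs [a] new = cs.flatMap (fun c => if c = a then new else [c]) := by
  simp only [PySem.Chars.replace, List.isEmpty_cons, Bool.false_eq_true, if_false]
  simpa using replace_go_single a new cs cs.length [] le_rfl

theorem string_to_variable_spec : Claim_equal_string_to_variable := by
  intro s _
  unfold Spec_string_to_variable string_to_variable string_to_variable_alt
  rw [← String.toList_inj]
  simp only [PySem.Str.toList_replace, String.toList_ofList]
  -- rewrite A's foldl step into 'acc ++ f char' form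
  have hstep :
      (fun (variable_name : List Char) (char : Char) =>
        if char = ' ' || char = '-' then variable_name ++ ['_']
        else if char = '(' || char = ')' || char = '.' then variable_name
        else variable_name ++ [char])
      = (fun acc char => acc ++
          (if char = ' ' || char = '-' then ['_']
           else if char = '(' || char = ')' || char = '.' then []
           else [char])) := by
    funext acc char
    split_ifs <;> simp
  rw [hstep, PySem.List.foldl_append_eq_flatMap, List.nil_append]
  -- B's five passes are five single-character flatMaps; fuse them
  simp only [show (" " : String).toList = [' '] from rfl, show ("-" : String).toList = ['-'] from rfl,
    show ("(" : String).toList = ['('] from rfl, show (")" : String).toList = [')'] from rfl,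
    show ("." : String).toList = ['.'] from rfl, show ("_" : String).toList = ['_'] from rfl,
    show ("" : String).toList = [] from rfl]
  simp only [replace_single]
  simp only [List.flatMap_assoc]
  apply List.flatMap_congr
  intro c _
  by_cases h1 : c = ' ' <;> by_cases h2 : c = '-' <;> by_cases h3 : c = '(' <;>
    by_cases h4 : c = ')' <;> by_cases h5 : c = '.' <;>
    simp_all
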